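-- pv_equiv track=rewrite | github.com/samlavery/ahn | MIII/aux_code.py | run_length_test
-- ===== SOURCE A (Python) =====
-- from collections import Counter
--
-- def run_length_test(sequence):
--     counts = Counter()
--     current, count = None, 0
--     for element in sequence:
--         if element == current:
--             count += 1
--         else:
--             if current is not None:
--                 counts[count] += 1
--             current, count = element, 1
--     counts[count] += 1  # for the last run
--     return counts
-- ===== SOURCE B (Python) =====
-- from collections import Counter
--
-- def run_length_test(sequence):
--     counts = Counter()
--     i, n = 0, len(sequence)
--     while i < n:
--         j = i + 1
--         while j < n and sequence[j] == sequence[i]: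
--             j += 1
--         counts[j - i] += 1
--         i = j
--     return counts
-- ===== Notes on version B (the rewrite author's own statement) =====
-- stated objective: alternative
-- what changed: B replaces A's per-element state machine (current value, running count, flush-on-change) with a two-pointer scan that finds each maximal run's end index directly and counts its length j-i, carrying no current/count state across elements.
-- intended difference: On the empty sequence A returns Counter({0: 1}) because it unconditionally bumps counts[count] after the loop with count still 0; B returns the empty Counter, which is intended since an empty sequence contains no runs (and certainly no run of length 0). — e.g. on run_length_test([]): A returns [(0, 1)], B returns []
import Mathlib
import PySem

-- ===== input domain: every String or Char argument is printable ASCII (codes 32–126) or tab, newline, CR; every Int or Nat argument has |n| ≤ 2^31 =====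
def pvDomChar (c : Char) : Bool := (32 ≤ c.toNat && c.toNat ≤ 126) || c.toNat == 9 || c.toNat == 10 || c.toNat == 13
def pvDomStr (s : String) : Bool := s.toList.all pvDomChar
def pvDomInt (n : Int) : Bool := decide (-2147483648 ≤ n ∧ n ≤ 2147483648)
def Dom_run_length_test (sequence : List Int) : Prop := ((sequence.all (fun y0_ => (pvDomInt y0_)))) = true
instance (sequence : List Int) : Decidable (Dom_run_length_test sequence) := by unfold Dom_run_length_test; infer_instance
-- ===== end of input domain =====

-- B replaces A's element-wise current/count state machine with a two-pointer maximal-run scan;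
-- on the empty sequence A returns [(0,1)] (it bumps counts[0] after an empty loop) while B returns the
-- intended empty counter (stated as D_ below).


-- ===== PORT A =====
-- A's loop body: state = (counts, current, count)
def rltStepA (s : PySem.Dict Int Int × Option Int × Int) (element : Int) :
    PySem.Dict Int Int × Option Int × Int :=
  match s with
  | (counts, current, count) =>
    if current == some element then (counts, current, count + 1)
    else
      let counts' := match current with
        | some _ => counts.modify count 0 (· + 1)   -- counts[count] += 1
        | none => counts
      (counts', some element, 1)

def run_length_test (sequence : List Int) : List (Int × Int) :=
  let st := sequence.foldl rltStepA (PySem.Dict.empty, none, 0)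
  (st.1.modify st.2.2 0 (· + 1)).items              -- counts[count] += 1 for the last run

-- ===== PORT B =====
-- the outer while loop: consume one maximal run per step (inner while = takeWhile/dropWhile)
def rltRuns (counts : PySem.Dict Int Int) : List Int → PySem.Dict Int Int
  | [] => counts
  | x :: xs =>
      rltRuns (counts.modify (1 + ((xs.takeWhile (· == x)).length : Int)) 0 (· + 1))
        (xs.dropWhile (· == x))
termination_by l => l.length
decreasing_by
  simp only [List.length_cons]
  exact Nat.lt_succ_of_le (xs.dropWhile_sublist (· == x)).length_le

def run_length_test_alt (sequence : List Int) : List (Int × Int) :=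
  (rltRuns PySem.Dict.empty sequence).items

-- ===== PRECONDITION & SPEC =====
-- On the empty sequence A returns [(0,1)] (a spurious run of length 0 from its unconditional final
-- bump); B returns [], the intended answer: an empty sequence has no runs.
def D_run_length_test (sequence : List Int) : Prop := sequence = []
instance (sequence : List Int) : Decidable (D_run_length_test sequence) := by unfold D_run_length_test; infer_instance
def Spec_run_length_test (sequence : List Int) (out : List (Int × Int)) : Prop := ¬ D_run_length_test sequence → out = run_length_test_alt sequence
instance (sequence : List Int) (out : List (Int × Int)) : Decidable (Spec_run_length_test sequence out) := by unfold Spec_run_length_test; infer_instance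
def pvDiffWitness_run_length_test : List Int := []
def pvDiffWitnessOut_run_length_test : (List (Int × Int)) × (List (Int × Int)) := ([(0, 1)], [])

-- ===== CLAIM (what is proved, stated in full; the proofs are below) =====
def Claim_unchanged_run_length_test : Prop := ∀ (sequence : List Int), Dom_run_length_test sequence → Spec_run_length_test sequence (run_length_test sequence)
def Claim_changed_run_length_test : Prop := Dom_run_length_test (pvDiffWitness_run_length_test) ∧ D_run_length_test (pvDiffWitness_run_length_test) ∧ run_length_test (pvDiffWitness_run_length_test) = pvDiffWitnessOut_run_length_test.1 ∧ run_length_test_alt (pvDiffWitness_run_length_test) = pvDiffWitnessOut_run_length_test.2 ∧ pvDiffWitnessOut_run_length_test.1 ≠ pvDiffWitnessOut_run_length_test.2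
def Claim_exact_run_length_test : Prop := ∀ (sequence : List Int), Dom_run_length_test sequence → D_run_length_test sequence → run_length_test sequence ≠ run_length_test_alt sequence

-- ===== LEMMAS AND PROOFS =====

-- after A's state machine has seen the first element of a run (current = some x, count = c ≥ 1),
-- finishing the fold and doing the final bump equals B's run recursion from the matching point.
theorem rltMain (xs : List Int) : ∀ (counts : PySem.Dict Int Int) (x c : Int),
    ((xs.foldl rltStepA (counts, some x, c)).1.modify
        (xs.foldl rltStepA (counts, some x, c)).2.2 0 (· + 1))
    = rltRuns (counts.modify (c + ((xs.takeWhile (· == x)).length : Int)) 0 (· + 1))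
        (xs.dropWhile (· == x)) := by
  induction xs with
  | nil => intro counts x c; simp [rltRuns]
  | cons y ys ih =>
    intro counts x c
    by_cases h : y = x
    · subst h
      simp only [List.foldl_cons, rltStepA, List.takeWhile_cons, List.dropWhile_cons,
        beq_self_eq_true, if_pos, List.length_cons]
      rw [ih counts y (c + 1)]
      congr 2
      push_cast; ring
    · have hb : (some x == some y) = false := by simp [Ne.symm h]
      have hb' : (y == x) = false := by simp [h]
      simp only [List.foldl_cons, rltStepA, hb, List.takeWhile_cons, List.dropWhile_cons, hb',
        Bool.false_eq_true, if_false]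
      rw [ih (counts.modify c 0 (· + 1)) y 1]
      simp [rltRuns]
  
theorem run_length_test_spec : Claim_unchanged_run_length_test := by
  intro sequence _ hD
  match sequence with
  | [] => exact absurd rfl hD
  | x :: xs =>
    show run_length_test (x :: xs) = run_length_test_alt (x :: xs)
    unfold run_length_test run_length_test_alt
    have hnone : ((none : Option Int) == some x) = false := rfl
    simp only [List.foldl_cons, rltStepA, hnone, Bool.false_eq_true, if_false]
    rw [rltMain xs PySem.Dict.empty x 1, rltRuns]

theorem run_length_test_changed : Claim_changed_run_length_test := by
  unfold Claim_changed_run_length_test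
  refine ⟨by decide, rfl, by decide, ?_, by decide⟩
  show (rltRuns PySem.Dict.empty []).items = []
  rw [rltRuns]; rfl

theorem run_length_test_tight : Claim_exact_run_length_test := by
  intro sequence _ hD
  subst hD
  have hB : run_length_test_alt [] = [] := by
    show (rltRuns PySem.Dict.empty []).items = []
    rw [rltRuns]; rfl
  rw [hB]
  decide
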